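-- pv_equiv track=rewrite | github.com/SkyTemple/skytemple | skytemple/module/moves_items/widget/item_lists.py | _calculate_relative_weights
-- ===== SOURCE A (Python) =====
-- from functools import reduce
-- from math import gcd
--
-- def _calculate_relative_weights(list_of_weights: list[int]) -> list[int]:
--     weights = []
--     if len(list_of_weights) < 1:
--         return []
--     for i in range(0, len(list_of_weights)):
--         weight = list_of_weights[i]
--         if weight != 0:
--             last_nonzero = i - 1
--             while last_nonzero >= 0 and list_of_weights[last_nonzero] == 0:
--                 last_nonzero -= 1
--             if last_nonzero != -1:
--                 weight -= list_of_weights[last_nonzero]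
--         weights.append(weight)
--     weights_nonzero = [w for w in weights if w != 0]
--     weights_gcd = 1
--     if len(weights_nonzero) > 0:
--         weights_gcd = reduce(gcd, weights_nonzero)
--     return [int(w / weights_gcd) for w in weights]
-- ===== SOURCE B (Python) =====
-- from math import gcd
--
--
-- def _calculate_relative_weights(list_of_weights: list[int]) -> list[int]:
--     # Single pass: track the last nonzero weight seen so far and fold the gcd
--     # of the nonzero differences as we go; then one division pass.
--     if not list_of_weights:
--         return []
--     diffs = []
--     last = 0
--     g = 0
--     for w in list_of_weights:
--         if w != 0:
--             d = w - last
--             last = w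
--         else:
--             d = 0
--         diffs.append(d)
--         if d != 0:
--             g = gcd(g, d)
--     if g == 0:
--         g = 1
--     return [d // g for d in diffs]
-- ===== Notes on version B (the rewrite author's own statement) =====
-- stated objective: faster
-- what changed: Replaces the quadratic backward rescan for the previous nonzero weight with a single forward pass that tracks the last nonzero weight and folds the gcd of the differences on the fly.
-- intended difference: On lists whose nonzero entries all equal one negative value, A's reduce(gcd,...) sees a single negative difference and keeps it as the divisor, so A flips the sign of every relative weight; B's gcd divisor is always positive and preserves the sign of the weights, which is the intended value. — e.g. on _calculate_relative_weights([0, -3]): A returns [0, 1], B returns [0, -1]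
import Mathlib
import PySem

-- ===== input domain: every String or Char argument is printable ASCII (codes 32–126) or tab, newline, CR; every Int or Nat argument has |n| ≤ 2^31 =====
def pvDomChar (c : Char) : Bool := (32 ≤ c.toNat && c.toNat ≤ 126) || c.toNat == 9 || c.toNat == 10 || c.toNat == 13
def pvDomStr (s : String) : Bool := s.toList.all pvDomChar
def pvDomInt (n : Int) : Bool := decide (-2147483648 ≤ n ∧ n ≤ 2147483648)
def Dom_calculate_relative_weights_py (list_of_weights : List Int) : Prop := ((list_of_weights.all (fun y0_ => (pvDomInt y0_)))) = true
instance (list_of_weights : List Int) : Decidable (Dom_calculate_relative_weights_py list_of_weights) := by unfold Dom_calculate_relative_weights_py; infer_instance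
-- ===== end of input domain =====

-- B replaces A's O(n^2) backward rescan for the previous nonzero weight by one
-- forward pass tracking the last nonzero weight and folding the gcd on the fly.

-- math.gcd, shared by both ports
def pyGcd (a b : Int) : Int := (Int.gcd a b : Int)

-- ===== PORT A =====
-- the `while last_nonzero >= 0 and xs[last_nonzero] == 0: last_nonzero -= 1`
-- loop, as the obvious structural recursion on k = last_nonzero + 1 (the loop
-- index stays in [-1, len)); returns the final last_nonzero.
def aScan (xs : List Int) : Nat → Int
  | 0 => -1
  | k + 1 => if (PySem.List.pyGet? xs (k : Int)).getD 1 = 0 then aScan xs k else (k : Int)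

def calculate_relative_weights_py (list_of_weights : List Int) : List Int :=
  if list_of_weights.length < 1 then [] else
  let weights := (List.range list_of_weights.length).foldl (fun (acc : List Int) (i : Nat) =>
    let weight := (PySem.List.pyGet? list_of_weights ((i : Nat) : Int)).getD 0
    let weight :=
      if weight ≠ 0 then
        -- last_nonzero := i - 1, then the while loop (aScan is called with k = i)
        let last_nonzero := aScan list_of_weights i
        if last_nonzero ≠ -1 then
          weight - (PySem.List.pyGet? list_of_weights last_nonzero).getD 0
        else weight
      else weight
    acc ++ [weight]) []
  let weights_nonzero := weights.filter (fun w => w ≠ 0)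
  -- reduce(gcd, l) on a nonempty l folds gcd over the tail starting from the head
  let weights_gcd : Int :=
    match weights_nonzero with
    | [] => 1
    | h :: t => t.foldl pyGcd h
  -- int(w / weights_gcd): exact here (weights_gcd divides every weight and the
  -- integer quotient is exactly representable as a float), and int() truncates,
  -- so this is truncating division.
  weights.map (fun w => w.tdiv weights_gcd)

-- ===== PORT B =====
-- B's loop body; state: (diffs, last, g)
def bStep (s : List Int × Int × Int) (w : Int) : List Int × Int × Int :=
  let d : Int := if w ≠ 0 then w - s.2.1 else 0
  let last := if w ≠ 0 then w else s.2.1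
  let g := if d ≠ 0 then pyGcd s.2.2 d else s.2.2
  (s.1 ++ [d], last, g)

def calculate_relative_weights_py_alt (list_of_weights : List Int) : List Int :=
  if list_of_weights = [] then [] else
  let s := list_of_weights.foldl bStep ([], 0, 0)
  let g := if s.2.2 = 0 then 1 else s.2.2
  s.1.map (fun d => PySem.Int.floordiv d g)

-- ===== PRECONDITION & SPEC =====
-- On lists whose nonzero entries all equal one negative value, A's
-- reduce(gcd, …) sees a single negative difference and keeps it as the
-- divisor, so A flips the sign of every relative weight; B's gcd divisor is
-- always positive and preserves the sign of the weights, which is the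
-- intended value.
def D_calculate_relative_weights_py (list_of_weights : List Int) : Prop :=
  list_of_weights.filter (fun y => y ≠ 0) ≠ [] ∧
  (list_of_weights.filter (fun y => y ≠ 0)).headD 0 < 0 ∧
  ∀ y ∈ list_of_weights.filter (fun y => y ≠ 0), y = (list_of_weights.filter (fun y => y ≠ 0)).headD 0
instance (list_of_weights : List Int) : Decidable (D_calculate_relative_weights_py list_of_weights) := by
  unfold D_calculate_relative_weights_py; infer_instance

def Spec_calculate_relative_weights_py (list_of_weights : List Int) (out : List Int) : Prop :=
  ¬ D_calculate_relative_weights_py list_of_weights → out = calculate_relative_weights_py_alt list_of_weights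
instance (list_of_weights : List Int) (out : List Int) : Decidable (Spec_calculate_relative_weights_py list_of_weights out) := by
  unfold Spec_calculate_relative_weights_py; infer_instance

def pvDiffWitness_calculate_relative_weights_py : List Int := [0, -3]
def pvDiffWitnessOut_calculate_relative_weights_py : (List Int) × (List Int) := ([0, 1], [0, -1])

-- ===== CLAIM (what is proved, stated in full; the proofs are below) =====
def Claim_unchanged_calculate_relative_weights_py : Prop := ∀ (list_of_weights : List Int), Dom_calculate_relative_weights_py list_of_weights → Spec_calculate_relative_weights_py list_of_weights (calculate_relative_weights_py list_of_weights)
def Claim_changed_calculate_relative_weights_py : Prop := Dom_calculate_relative_weights_py (pvDiffWitness_calculate_relative_weights_py) ∧ D_calculate_relative_weights_py (pvDiffWitness_calculate_relative_weights_py) ∧ calculate_relative_weights_py (pvDiffWitness_calculate_relative_weights_py) = pvDiffWitnessOut_calculate_relative_weights_py.1 ∧ calculate_relative_weights_py_alt (pvDiffWitness_calculate_relative_weights_py) = pvDiffWitnessOut_calculate_relative_weights_py.2 ∧ pvDiffWitnessOut_calculate_relative_weights_py.1 ≠ pvDiffWitnessOut_calculate_relative_weights_py.2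
def Claim_exact_calculate_relative_weights_py : Prop := ∀ (list_of_weights : List Int), Dom_calculate_relative_weights_py list_of_weights → D_calculate_relative_weights_py list_of_weights → calculate_relative_weights_py list_of_weights ≠ calculate_relative_weights_py_alt list_of_weights

-- ===== LEMMAS AND PROOFS =====

-- the common specification of the difference list: next value minus the last
-- nonzero value seen so far (0 before any)
def dspec : Int → List Int → List Int
  | _, [] => []
  | last, w :: ws => if w = 0 then 0 :: dspec last ws else (w - last) :: dspec w ws

-- the last nonzero value of ws, defaulting to last
def lastNZ : Int → List Int → Int
  | last, [] => last
  | last, w :: ws => if w = 0 then lastNZ last ws else lastNZ w ws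

theorem dspec_append (ws : List Int) (last w : Int) :
    dspec last (ws ++ [w]) =
      dspec last ws ++ [if w = 0 then 0 else w - lastNZ last ws] := by
  induction ws generalizing last with
  | nil => by_cases hw : w = 0 <;> simp [dspec, lastNZ, hw]
  | cons a ws ih =>
    by_cases ha : a = 0 <;> simp [dspec, lastNZ, ha, ih]

theorem scan_spec (xs : List Int) (i : Nat) (hi : i ≤ xs.length) :
    (aScan xs i = -1 ∧ lastNZ 0 (xs.take i) = 0) ∨
    (∃ j : Nat, aScan xs i = (j : Int) ∧
      (PySem.List.pyGet? xs ((j : Nat) : Int)).getD 0 = lastNZ 0 (xs.take i)) := by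
  induction i with
  | zero => left; simp [aScan, lastNZ]
  | succ i ih =>
    have hlt : i < xs.length := by omega
    have htake : xs.take (i + 1) = xs.take i ++ [xs[i]] := by
      rw [List.take_add_one]
      simp [List.getElem?_eq_getElem hlt]
    have hlast : ∀ l : Int, lastNZ l (xs.take (i+1)) =
        (if xs[i] = 0 then lastNZ l (xs.take i) else xs[i]) := by
      intro l
      rw [htake]
      have : ∀ (ws : List Int) (l w : Int), lastNZ l (ws ++ [w]) = if w = 0 then lastNZ l ws else w := by
        intro ws
        induction ws with
        | nil => intro l w; simp [lastNZ]
        | cons a ws ih2 => intro l w; by_cases ha : a = 0 <;> simp [lastNZ, ha, ih2]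
      exact this _ _ _
    have hget : xs[i]? = some xs[i] := List.getElem?_eq_getElem hlt
    by_cases hz : xs[i] = 0
    · have hstep : aScan xs (i + 1) = aScan xs i := by
        simp [aScan, hget, hz]
      rcases ih (by omega) with ⟨h1, h2⟩ | ⟨j, h1, h2⟩
      · left; rw [hstep, hlast, if_pos hz]; exact ⟨h1, h2⟩
      · right; exact ⟨j, by rw [hstep]; exact h1, by rw [hlast, if_pos hz]; exact h2⟩
    · right
      refine ⟨i, ?_, ?_⟩
      · simp [aScan, hget, hz]
      · rw [hlast, if_neg hz]
        simp [PySem.List.pyGet?_natCast, hget]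

theorem foldl_append_map (f : Nat → Int) (l : List Nat) (acc : List Int) :
    l.foldl (fun a i => a ++ [f i]) acc = acc ++ l.map f := by
  induction l generalizing acc with
  | nil => simp
  | cons a l ih => simp [ih]

-- A's weights list is dspec 0 xs
theorem a_weights_eq (xs : List Int) (i : Nat) (hi : i ≤ xs.length) :
    (List.range i).map (fun (i : Nat) =>
      let weight := (PySem.List.pyGet? xs ((i : Nat) : Int)).getD 0
      if weight ≠ 0 then
        let last_nonzero := aScan xs i
        if last_nonzero ≠ -1 then
          weight - (PySem.List.pyGet? xs last_nonzero).getD 0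
        else weight
      else weight) = dspec 0 (xs.take i) := by
  induction i with
  | zero => simp [dspec]
  | succ i ih =>
    have hlt : i < xs.length := by omega
    have htake : xs.take (i + 1) = xs.take i ++ [xs[i]] := by
      rw [List.take_add_one]
      simp [List.getElem?_eq_getElem hlt]
    rw [List.range_succ, List.map_append, ih (by omega), htake, dspec_append, List.map_cons,
      List.map_nil]
    congr 1
    have hg : xs[i]? = some xs[i] := List.getElem?_eq_getElem hlt
    by_cases hz : xs[i] = 0
    · simp [hg, hz]
    · rcases scan_spec xs i (by omega) with ⟨h1, h2⟩ | ⟨j, h1, h2⟩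
      · simp [hg, hz, h1, h2]
      · have hj : (j : Int) ≠ -1 := by omega
        simp only [PySem.List.pyGet?_natCast] at h2
        simp [hg, hz, h1, hj, h2]

-- B's fold state
theorem b_fold_eq (ws : List Int) (acc : List Int) (last g : Int) :
    ws.foldl bStep (acc, last, g) =
    (acc ++ dspec last ws, lastNZ last ws,
      (dspec last ws).foldl (fun g d => if d ≠ 0 then pyGcd g d else g) g) := by
  induction ws generalizing acc last g with
  | nil => simp [dspec, lastNZ]
  | cons w ws ih =>
    rw [List.foldl_cons]
    by_cases hw : w = 0
    · have hstep : bStep (acc, last, g) w = (acc ++ [0], last, g) := by simp [bStep, hw]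
      rw [hstep, ih]
      simp [dspec, lastNZ, hw, List.append_assoc]
    · by_cases hd : w - last = 0
      · have hstep : bStep (acc, last, g) w = (acc ++ [0], w, g) := by simp [bStep, hw, hd]
        rw [hstep, ih]
        simp [dspec, lastNZ, hw, hd, List.append_assoc]
      · have hstep : bStep (acc, last, g) w = (acc ++ [w - last], w, pyGcd g (w - last)) := by
          simp [bStep, hw, hd]
        rw [hstep, ih]
        simp [dspec, lastNZ, hw, hd, List.append_assoc]

theorem gskip_eq_filter_fold (l : List Int) (g : Int) :
    l.foldl (fun g d => if d ≠ 0 then pyGcd g d else g) g = (l.filter (fun y => y ≠ 0)).foldl pyGcd g := by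
  induction l generalizing g with
  | nil => rfl
  | cons a l ih =>
    rw [List.foldl_cons, List.filter_cons]
    by_cases ha : a = 0
    · simpa [ha] using ih g
    · simpa [ha] using ih (pyGcd g a)

theorem fold_gcd_dvd (l : List Int) (a : Int) :
    (l.foldl pyGcd a) ∣ a ∧ ∀ x ∈ l, (l.foldl pyGcd a) ∣ x := by
  induction l generalizing a with
  | nil => simp
  | cons b l ih =>
    obtain ⟨h1, h2⟩ := ih (pyGcd a b)
    refine ⟨h1.trans (Int.gcd_dvd_left a b), ?_⟩
    intro x hx
    rcases List.mem_cons.1 hx with rfl | hx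
    · exact h1.trans (Int.gcd_dvd_right a x)
    · exact h2 x hx

theorem fold_gcd_nonneg (l : List Int) (a : Int) (ha : 0 ≤ a) : 0 ≤ l.foldl pyGcd a := by
  induction l generalizing a with
  | nil => exact ha
  | cons b l ih => exact ih _ (by unfold pyGcd; positivity)

theorem fold_gcd_ne_zero (l : List Int) (a : Int) (ha : a ≠ 0) : l.foldl pyGcd a ≠ 0 := by
  induction l generalizing a with
  | nil => exact ha
  | cons b l ih =>
    refine ih _ ?_
    simp only [pyGcd]
    intro h
    exact ha ((Int.gcd_eq_zero_iff.1 (by exact_mod_cast h)).1)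

theorem pyGcd_natAbs (a b : Int) : pyGcd ((a.natAbs : Int)) b = pyGcd a b := by
  simp [pyGcd, Int.gcd, Int.natAbs_abs]

theorem filter_ne_cons (w : Int) (l : List Int) (hw : w ≠ 0) :
    (w :: l).filter (fun y => y ≠ 0) = w :: l.filter (fun y => y ≠ 0) := by
  simp [hw]

theorem filter_ne_cons_zero (l : List Int) :
    ((0 : Int) :: l).filter (fun y => y ≠ 0) = l.filter (fun y => y ≠ 0) := by
  simp

theorem filter_ne_nil (l : List Int) :
    l.filter (fun y => y ≠ 0) = [] ↔ ∀ a ∈ l, a = 0 := by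
  simp [List.filter_eq_nil_iff]

theorem L_empty_mem (ws : List Int) (last : Int) :
    (∀ a ∈ dspec last ws, a = 0) ↔ (∀ y ∈ ws, y ≠ 0 → y = last) := by
  induction ws generalizing last with
  | nil => simp [dspec]
  | cons w ws ih =>
    by_cases hw : w = 0
    · simp [dspec, hw, ih]
    · by_cases hwl : w = last
      · subst hwl
        simp [dspec, hw, ih]
      · have hne : w - last ≠ 0 := by omega
        simp [dspec, hw, hne, hwl]

theorem L_empty (ws : List Int) (last : Int) :
    ((dspec last ws).filter (fun y => y ≠ 0) = []) ↔
      ∀ y ∈ ws.filter (fun y => y ≠ 0), y = last := by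
  rw [filter_ne_nil]
  have h2 : (∀ y ∈ ws.filter (fun y => y ≠ 0), y = last) ↔ ∀ y ∈ ws, y ≠ 0 → y = last := by
    simp
  rw [h2]
  exact L_empty_mem ws last

theorem L_one (ws : List Int) (v : Int) :
    ((dspec 0 ws).filter (fun y => y ≠ 0) = [v]) ↔
      (ws.filter (fun y => y ≠ 0) ≠ [] ∧ (ws.filter (fun y => y ≠ 0)).headD 0 = v ∧
        ∀ y ∈ ws.filter (fun y => y ≠ 0), y = v) := by
  induction ws with
  | nil => simp [dspec]
  | cons w ws ih =>
    by_cases hw : w = 0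
    · subst hw
      have hd : dspec 0 ((0 : Int) :: ws) = 0 :: dspec 0 ws := by simp [dspec]
      rw [hd, filter_ne_cons_zero, filter_ne_cons_zero]
      exact ih
    · have hd : dspec 0 (w :: ws) = w :: dspec w ws := by simp [dspec, hw]
      rw [hd, filter_ne_cons _ _ hw, filter_ne_cons _ _ hw]
      constructor
      · intro h
        obtain ⟨rfl, hnil⟩ := List.cons_eq_cons.1 h
        have hall := (L_empty ws w).1 hnil
        refine ⟨by simp, rfl, ?_⟩
        intro y hy
        rcases List.mem_cons.1 hy with rfl | hy
        · rfl
        · exact hall y hy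
      · rintro ⟨-, hv, hall⟩
        have hwv : w = v := by simpa using hv
        subst hwv
        have hnil : (dspec w ws).filter (fun y => y ≠ 0) = [] :=
          (L_empty ws w).2 (fun y hy => hall y (List.mem_cons_of_mem _ hy))
        rw [hnil]

theorem tdiv_eq_floordiv_of_dvd (d g : Int) (hdvd : g ∣ d) (hg : 0 < g) :
    d.tdiv g = PySem.Int.floordiv d g := by
  obtain ⟨c, rfl⟩ := hdvd
  rw [PySem.Int.floordiv_eq_ediv_of_pos hg]
  rw [Int.mul_tdiv_cancel_left _ (by omega), Int.mul_ediv_cancel_left _ (by omega)]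

theorem map_mem_ne (l : List Int) (f g : Int → Int) (a : Int) (ha : a ∈ l) (h : f a ≠ g a) :
    l.map f ≠ l.map g := by
  intro he
  induction l with
  | nil => simp at ha
  | cons b l ih =>
    simp only [List.map_cons, List.cons.injEq] at he
    rcases List.mem_cons.1 ha with rfl | ha
    · exact h he.1
    · exact ih ha he.2

theorem maps_eq (ds : List Int) (g : Int) (hg : 0 < g) (hdvd : ∀ w ∈ ds, g ∣ w) :
    ds.map (fun w => w.tdiv g) = ds.map (fun d => PySem.Int.floordiv d g) :=
  List.map_congr_left (fun a ha => tdiv_eq_floordiv_of_dvd a g (hdvd a ha) hg)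

theorem reduce_gcd_dvd (h : Int) (t : List Int) : ∀ x ∈ h :: t, (t.foldl pyGcd h) ∣ x := by
  intro x hx
  cases t with
  | nil =>
    simp only [List.mem_singleton] at hx
    subst hx
    simp
  | cons t0 t' =>
    rw [List.foldl_cons]
    have hfd := fold_gcd_dvd t' (pyGcd h t0)
    rcases List.mem_cons.1 hx with rfl | hx2
    · exact hfd.1.trans (Int.gcd_dvd_left x t0)
    · rcases List.mem_cons.1 hx2 with rfl | hx3
      · exact hfd.1.trans (Int.gcd_dvd_right h x)
      · exact hfd.2 x hx3

theorem cons_fold_pos (h t0 : Int) (t' : List Int) (hh : h ≠ 0) :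
    0 < t'.foldl pyGcd (pyGcd h t0) := by
  have h1 : 0 ≤ t'.foldl pyGcd (pyGcd h t0) :=
    fold_gcd_nonneg _ _ (by unfold pyGcd; positivity)
  have h2 : t'.foldl pyGcd (pyGcd h t0) ≠ 0 := by
    apply fold_gcd_ne_zero
    unfold pyGcd
    intro hc
    exact hh ((Int.gcd_eq_zero_iff.1 (by exact_mod_cast hc)).1)
  omega

theorem a_unfold (xs : List Int) (h : xs ≠ []) :
    calculate_relative_weights_py xs =
      (dspec 0 xs).map (fun w => w.tdiv
        (match (dspec 0 xs).filter (fun w => w ≠ 0) with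
          | [] => (1 : Int)
          | h :: t => t.foldl pyGcd h)) := by
  have hlen : ¬ xs.length < 1 := by
    have := List.length_pos_iff.2 h
    omega
  have hw := a_weights_eq xs xs.length le_rfl
  rw [List.take_length] at hw
  unfold calculate_relative_weights_py
  rw [if_neg hlen, foldl_append_map, List.nil_append, hw]

theorem b_unfold (xs : List Int) (h : xs ≠ []) :
    calculate_relative_weights_py_alt xs =
      (dspec 0 xs).map (fun d => PySem.Int.floordiv d
        (if ((dspec 0 xs).filter (fun y => y ≠ 0)).foldl pyGcd 0 = 0 then 1
         else ((dspec 0 xs).filter (fun y => y ≠ 0)).foldl pyGcd 0)) := by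
  unfold calculate_relative_weights_py_alt
  rw [if_neg h, b_fold_eq, gskip_eq_filter_fold, List.nil_append]

-- ===== VERDICT (by name: the statement is the Claim_ definition above) =====
theorem calculate_relative_weights_py_spec : Claim_unchanged_calculate_relative_weights_py := by
  intro xs _ hD
  by_cases hnil : xs = []
  · subst hnil
    simp [calculate_relative_weights_py, calculate_relative_weights_py_alt]
  · rw [a_unfold xs hnil, b_unfold xs hnil]
    rcases hfil : (dspec 0 xs).filter (fun y => y ≠ 0) with _ | ⟨h, t⟩
    · rw [hfil]
      have hm : (match ([] : List Int) with | [] => (1 : Int) | h :: t => t.foldl pyGcd h) = 1 := rfl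
      have hif : (if ([] : List Int).foldl pyGcd 0 = 0 then (1 : Int) else ([] : List Int).foldl pyGcd 0) = 1 := by
        simp
      rw [hm, hif]
      refine List.map_congr_left (fun a _ => ?_)
      rw [Int.tdiv_one, PySem.Int.floordiv_eq_ediv_of_pos one_pos, Int.ediv_one]
    · have hh : h ≠ 0 := by
        have hm : h ∈ (dspec 0 xs).filter (fun y => y ≠ 0) := by
          rw [hfil]; exact List.mem_cons_self
        simpa using (List.mem_filter.1 hm).2
      have hdvd0 : ∀ x ∈ h :: t, (t.foldl pyGcd h) ∣ x := reduce_gcd_dvd h t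
      have hdvd : ∀ w ∈ dspec 0 xs, (t.foldl pyGcd h) ∣ w := by
        intro w hw
        by_cases hwz : w = 0
        · subst hwz; exact dvd_zero _
        · have : w ∈ (dspec 0 xs).filter (fun y => y ≠ 0) :=
            List.mem_filter.2 ⟨hw, by simpa using hwz⟩
          rw [hfil] at this
          exact hdvd0 w this
      rw [hfil]
      cases t with
      | nil =>
        -- single nonzero difference: ¬D forces it positive
        obtain ⟨hne, hhead, hall⟩ := (L_one xs h).1 hfil
        have hpos : 0 < h := by
          rcases lt_trichotomy h 0 with hlt | heq | hgt
          · exfalso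
            apply hD
            refine ⟨hne, ?_, ?_⟩
            · rw [hhead]; exact hlt
            · intro y hy; rw [hhead]; exact hall y hy
          · exact absurd heq hh
          · exact hgt
        have hgsk : [h].foldl pyGcd 0 = h := by
          simp only [List.foldl_cons, List.foldl_nil]
          have h0 : pyGcd 0 h = (h.natAbs : Int) := by simp [pyGcd]
          rw [h0]
          omega
        have hm : (match ([h] : List Int) with | [] => (1 : Int) | h :: t => t.foldl pyGcd h) = h := rfl
        rw [hm, hgsk, if_neg (by omega)]
        exact maps_eq _ h hpos hdvd
      | cons t0 t' =>
        have hm : (match (h :: t0 :: t' : List Int) with | [] => (1 : Int) | h :: t => t.foldl pyGcd h)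
            = t'.foldl pyGcd (pyGcd h t0) := rfl
        have hbase : pyGcd (pyGcd 0 h) t0 = pyGcd h t0 := by
          have h0 : pyGcd 0 h = (h.natAbs : Int) := by simp [pyGcd]
          rw [h0, pyGcd_natAbs]
        have hgsk : (h :: t0 :: t').foldl pyGcd 0 = t'.foldl pyGcd (pyGcd h t0) := by
          simp only [List.foldl_cons, hbase]
        have hpos := cons_fold_pos h t0 t' hh
        simp only [List.foldl_cons] at hdvd
        rw [hm, hgsk, if_neg (by omega)]
        exact maps_eq _ _ hpos hdvd

theorem calculate_relative_weights_py_changed : Claim_changed_calculate_relative_weights_py := by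
  unfold Claim_changed_calculate_relative_weights_py; decide

theorem calculate_relative_weights_py_tight : Claim_exact_calculate_relative_weights_py := by
  intro xs _ hD
  obtain ⟨hne, hneg, hall⟩ := hD
  have hnil : xs ≠ [] := by
    intro h; subst h; simp at hne
  have hfil : (dspec 0 xs).filter (fun y => y ≠ 0) = [(xs.filter (fun y => y ≠ 0)).headD 0] :=
    (L_one xs _).2 ⟨hne, rfl, hall⟩
  set v := (xs.filter (fun y => y ≠ 0)).headD 0 with hv
  have hvne : v ≠ 0 := by
    have hm : v ∈ (dspec 0 xs).filter (fun y => y ≠ 0) := by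
      rw [hfil]; exact List.mem_cons_self
    simpa using (List.mem_filter.1 hm).2
  have hvmem : v ∈ dspec 0 xs := by
    have hm : v ∈ (dspec 0 xs).filter (fun y => y ≠ 0) := by
      rw [hfil]; exact List.mem_cons_self
    exact (List.mem_filter.1 hm).1
  have hneg' : v < 0 := hneg
  rw [a_unfold xs hnil, b_unfold xs hnil, hfil]
  have hgsk : [v].foldl pyGcd 0 = -v := by
    simp only [List.foldl_cons, List.foldl_nil]
    have h0 : pyGcd 0 v = (v.natAbs : Int) := by simp [pyGcd]
    rw [h0]
    omega
  have hm : (match ([v] : List Int) with | [] => (1 : Int) | h :: t => t.foldl pyGcd h) = v := rfl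
  rw [hm, hgsk, if_neg (by omega)]
  apply map_mem_ne _ _ _ v hvmem
  have h1 : v.tdiv v = 1 := Int.tdiv_self hvne
  have h2 : PySem.Int.floordiv v (-v) = -1 := by
    rw [PySem.Int.floordiv_eq_ediv_of_pos (by omega), Int.ediv_neg, Int.ediv_self hvne]
  rw [h1, h2]
  omega
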